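-- pv_equiv track=rewrite | github.com/cobwebSim/cobweb-py | cobweb_py/scoring.py | _resolve_plot_id
-- ===== SOURCE A (Python) =====
-- from typing import Any, List, Mapping, Dict, Optional, Union, Tuple
--
-- PLOTS: Dict[int, str] = {
--     # Core performance
--     1:  "equity_curve_linear",
--     2:  "equity_curve_log",
--     3:  "equity_vs_benchmark",
--     4:  "daily_return_ts",
--     5:  "rolling_sharpe",
--     6:  "rolling_sortino",
--     7:  "rolling_volatility",
--     8:  "rolling_beta",
--     9:  "rolling_alpha",
--     10: "drawdown_underwater",
--     11: "drawdown_duration",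
--     12: "drawdown_distribution",
--     13: "var_over_time",
--     14: "cvar_over_time",
--     15: "tail_risk_histogram",
--     # Trade analysis
--     16: "trade_return_distribution",
--     17: "win_loss_overlay",
--     18: "expectancy_over_time",
--     19: "trade_duration_vs_return",
--     # Regime / context
--     20: "performance_by_volatility_regime",
--     21: "performance_by_trend_regime",
--     22: "performance_bull_vs_bear",
--     # Feature diagnostics
--     23: "feature_correlation_heatmap",
--     # Volume / execution
--     24: "volume_ts",
--     25: "volume_shock_20",
--     26: "trade_participation_ts",
--     27: "transaction_costs_ts",
-- }
--
-- def _resolve_plot_id(query: str) -> int: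
--     """
--     Resolve a fuzzy plot name string to its integer plot ID.
--
--     Uses the same normalisation (lowercase, strip _, - and spaces) as
--     _resolve_category, then matches against PLOTS names (not categories).
--
--     Raises ValueError when the query is ambiguous or unrecognised — the
--     message includes all matching or available plot names so the caller
--     can refine their input. Use show_plots() for a full reference.
--     """
--     def _norm(s: str) -> str:
--         return s.lower().replace("_", "").replace("-", "").replace(" ", "")
--
--     q = _norm(query)
--     # normalised name -> plot id
--     norm_map: Dict[str, int] = {_norm(name): pid for pid, name in PLOTS.items()}
--
--     def _fmt(ids: List[int]) -> str:
--         return ", ".join(f"{pid}={PLOTS[pid]}" for pid in sorted(ids))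
--
--     # 1. Exact match
--     if q in norm_map:
--         return norm_map[q]
--
--     # 2. Prefix match
--     prefix = [norm_map[k] for k in norm_map if k.startswith(q)]
--     if len(prefix) == 1:
--         return prefix[0]
--     if len(prefix) > 1:
--         raise ValueError(
--             f"Ambiguous plot name '{query}' — {len(prefix)} matches: {_fmt(prefix)}. "
--             f"Be more specific."
--         )
--
--     # 3. Substring match
--     sub = [norm_map[k] for k in norm_map if q in k]
--     if len(sub) == 1:
--         return sub[0]
--     if len(sub) > 1:
--         raise ValueError(
--             f"Ambiguous plot name '{query}' — {len(sub)} matches: {_fmt(sub)}. "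
--             f"Be more specific."
--         )
--
--     # No match at all
--     raise ValueError(
--         f"No plot matched '{query}'. Run show_plots() to see all available plot names."
--     )
-- ===== SOURCE B (Python) =====
-- PLOTS = {
--     1:  "equity_curve_linear",
--     2:  "equity_curve_log",
--     3:  "equity_vs_benchmark",
--     4:  "daily_return_ts",
--     5:  "rolling_sharpe",
--     6:  "rolling_sortino",
--     7:  "rolling_volatility",
--     8:  "rolling_beta",
--     9:  "rolling_alpha",
--     10: "drawdown_underwater",
--     11: "drawdown_duration",
--     12: "drawdown_distribution",
--     13: "var_over_time",
--     14: "cvar_over_time",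
--     15: "tail_risk_histogram",
--     16: "trade_return_distribution",
--     17: "win_loss_overlay",
--     18: "expectancy_over_time",
--     19: "trade_duration_vs_return",
--     20: "performance_by_volatility_regime",
--     21: "performance_by_trend_regime",
--     22: "performance_bull_vs_bear",
--     23: "feature_correlation_heatmap",
--     24: "volume_ts",
--     25: "volume_shock_20",
--     26: "trade_participation_ts",
--     27: "transaction_costs_ts",
-- }
--
-- def _resolve_plot_id(query: str) -> int:
--     # Rank-and-argmin algorithm: score every plot name with a match rank
--     # (0 = exact, 1 = proper prefix, 2 = other substring, 3 = no match),
--     # keep the best-ranked class, and decide by its size — instead of A's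
--     # staged exact / prefix / substring scans with early returns.
--     def _norm(s: str) -> str:
--         return s.lower().replace("_", "").replace("-", "").replace(" ", "")
--
--     def _rank(q: str, k: str) -> int:
--         if k == q:
--             return 0
--         if k.startswith(q):
--             return 1
--         if q in k:
--             return 2
--         return 3
--
--     q = _norm(query)
--     scored = [(_rank(q, _norm(name)), pid) for pid, name in PLOTS.items()]
--     cands = [rp for rp in scored if rp[0] < 3]
--     if not cands:
--         raise ValueError(
--             f"No plot matched '{query}'. Run show_plots() to see all available plot names."
--         )
--     best = min(r for r, _ in cands)
--     winners = [pid for r, pid in cands if r == best]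
--     if best == 0 or len(winners) == 1:
--         return winners[0]
--     listing = ", ".join(f"{pid}={PLOTS[pid]}" for pid in sorted(winners))
--     raise ValueError(
--         f"Ambiguous plot name '{query}' — {len(winners)} matches: {listing}. "
--         f"Be more specific."
--     )
-- ===== Notes on version B (the rewrite author's own statement) =====
-- stated objective: alternative
-- what changed: B replaces A's staged scans with early returns (exact dict lookup, then a prefix scan, then a substring scan) by a rank-and-argmin algorithm: every plot name is scored with a match rank (0 exact, 1 proper prefix, 2 other substring, 3 none), the best-ranked class is selected by min, and the result is decided from that class's size; Pre_ excludes only the inputs on which A raises ValueError (ambiguous or unmatched queries), where B raises the same ValueError.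
import Mathlib
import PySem

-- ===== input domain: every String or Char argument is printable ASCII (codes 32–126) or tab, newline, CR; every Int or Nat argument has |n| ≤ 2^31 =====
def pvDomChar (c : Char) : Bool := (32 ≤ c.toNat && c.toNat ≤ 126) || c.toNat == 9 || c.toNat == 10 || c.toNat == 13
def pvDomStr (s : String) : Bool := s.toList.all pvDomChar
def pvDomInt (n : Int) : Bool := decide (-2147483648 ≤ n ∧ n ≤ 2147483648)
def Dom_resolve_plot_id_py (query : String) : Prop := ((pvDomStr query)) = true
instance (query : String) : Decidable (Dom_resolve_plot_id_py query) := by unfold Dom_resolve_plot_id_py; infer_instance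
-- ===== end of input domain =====

-- B resolves the query by a rank-and-argmin algorithm (score every name 0/1/2/3, keep the
-- best-ranked class, decide by its size) instead of A's staged exact/prefix/substring scans;
-- same cost, different algorithm. Raise paths of both Pythons are outside Pre_, ported as -1.

-- ===== PORT A =====
-- _norm(s): lower, then strip '_', '-', ' '
def pvNorm (s : String) : String :=
  PySem.Str.replace (PySem.Str.replace (PySem.Str.replace (PySem.Str.lower s) "_" "") "-" "") " " ""

-- PLOTS, in insertion order
def pvPLOTS : List (Int × String) := [
  (1, "equity_curve_linear"), (2, "equity_curve_log"), (3, "equity_vs_benchmark"),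
  (4, "daily_return_ts"), (5, "rolling_sharpe"), (6, "rolling_sortino"),
  (7, "rolling_volatility"), (8, "rolling_beta"), (9, "rolling_alpha"),
  (10, "drawdown_underwater"), (11, "drawdown_duration"), (12, "drawdown_distribution"),
  (13, "var_over_time"), (14, "cvar_over_time"), (15, "tail_risk_histogram"),
  (16, "trade_return_distribution"), (17, "win_loss_overlay"), (18, "expectancy_over_time"),
  (19, "trade_duration_vs_return"), (20, "performance_by_volatility_regime"),
  (21, "performance_by_trend_regime"), (22, "performance_bull_vs_bear"),
  (23, "feature_correlation_heatmap"), (24, "volume_ts"), (25, "volume_shock_20"),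
  (26, "trade_participation_ts"), (27, "transaction_costs_ts")]

def resolve_plot_id_py (query : String) : Int :=
  let q := pvNorm query
  -- norm_map: {_norm(name): pid for pid, name in PLOTS.items()}
  let norm_map : PySem.Dict String Int :=
    PySem.Dict.ofList (pvPLOTS.map (fun p => (pvNorm p.2, p.1)))
  match norm_map.get? q with
  | some v => v          -- 1. exact match: return norm_map[q]
  | none =>
    -- 2. prefix = [norm_map[k] for k in norm_map if k.startswith(q)]
    -- (keys are unique, so norm_map[k] over the keys is the items' value)
    let pfx := (norm_map.items.filter (fun kv => PySem.Str.startswith kv.1 q)).map (·.2)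
    if pfx.length = 1 then pfx.getD 0 0
    else if pfx.length > 1 then -1     -- raise ValueError (ambiguous) — outside Pre_
    else
      -- 3. sub = [norm_map[k] for k in norm_map if q in k]
      let sub := (norm_map.items.filter (fun kv => PySem.Str.isIn q kv.1)).map (·.2)
      if sub.length = 1 then sub.getD 0 0
      else -1                          -- raise ValueError — outside Pre_

-- ===== PORT B =====
-- _rank(q, k): 0 exact, 1 proper prefix, 2 other substring, 3 no match
def pvRank (q k : String) : Int :=
  if k = q then 0
  else if PySem.Str.startswith k q then 1
  else if PySem.Str.isIn q k then 2
  else 3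

def resolve_plot_id_py_alt (query : String) : Int :=
  let q := pvNorm query
  -- scored = [(_rank(q, _norm(name)), pid) for pid, name in PLOTS.items()]
  let scored := pvPLOTS.map (fun p => (pvRank q (pvNorm p.2), p.1))
  -- cands = [rp for rp in scored if rp[0] < 3]
  let cands := scored.filter (fun rp => rp.1 < 3)
  match cands with
  | [] => -1                           -- raise ValueError (no match) — outside Pre_
  | _ :: _ =>
    -- best = min(r for r, _ in cands)   (cands is nonempty here)
    let best := (PySem.List.min? (cands.map (·.1)) (fun x => x)).getD 0
    -- winners = [pid for r, pid in cands if r == best]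
    let winners := (cands.filter (fun rp => rp.1 = best)).map (·.2)
    if best = 0 ∨ winners.length = 1 then winners.getD 0 (-1)   -- winners[0] (nonempty here)
    else -1                            -- raise ValueError (ambiguous) — outside Pre_

-- ===== PRECONDITION & SPEC =====
-- Pre_ holds exactly where Python A returns: an exact normalised match, or a unique prefix
-- match, or (no prefix match and) a unique substring match; on all other inputs A raises ValueError.
def Pre_resolve_plot_id_py (query : String) : Prop :=
  let q := pvNorm query
  let ks := pvPLOTS.map (fun p => pvNorm p.2)
  q ∈ ks ∨
  ks.countP (fun k => PySem.Str.startswith k q) = 1 ∨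
  (ks.countP (fun k => PySem.Str.startswith k q) = 0 ∧
   ks.countP (fun k => PySem.Str.isIn q k) = 1)
instance (query : String) : Decidable (Pre_resolve_plot_id_py query) := by
  unfold Pre_resolve_plot_id_py; infer_instance

def pvWitness_resolve_plot_id_py : String := "equity_curve_log"

def Spec_resolve_plot_id_py (query : String) (out : Int) : Prop := out = resolve_plot_id_py_alt query
instance (query : String) (out : Int) : Decidable (Spec_resolve_plot_id_py query out) := by unfold Spec_resolve_plot_id_py; infer_instance

-- ===== CLAIM (what is proved, stated in full; the proofs are below) =====
def Claim_equal_resolve_plot_id_py : Prop := ∀ (query : String), Dom_resolve_plot_id_py query → Pre_resolve_plot_id_py query → Spec_resolve_plot_id_py query (resolve_plot_id_py query)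

-- ===== LEMMAS AND PROOFS =====

theorem pvRank_nonneg (q k : String) : 0 ≤ pvRank q k := by
  unfold pvRank; split_ifs <;> norm_num
theorem pvRank_eq_zero_iff (q k : String) : pvRank q k = 0 ↔ k = q := by
  unfold pvRank; split_ifs with h1 h2 h3 <;> simp_all
theorem pvRank_one_le (q k : String) (h : ¬ k = q) : 1 ≤ pvRank q k := by
  unfold pvRank; split_ifs <;> simp_all
theorem pvRank_eq_one_iff (q k : String) (h : ¬ k = q) :
    pvRank q k = 1 ↔ PySem.Str.startswith k q = true := by
  unfold pvRank; split_ifs <;> simp_all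
theorem pvRank_lt3_iff_isIn (q k : String) (h : ¬ k = q)
    (h2 : ¬ PySem.Str.startswith k q = true) :
    (pvRank q k < 3 ↔ PySem.Str.isIn q k = true) ∧
    (pvRank q k = 2 ↔ PySem.Str.isIn q k = true) := by
  unfold pvRank; split_ifs <;> simp_all
theorem pv_min?_eq (xs : List Int) (b : Int) (hb : b ∈ xs) (hall : ∀ x ∈ xs, b ≤ x) :
    PySem.List.min? xs (fun x => x) = some b := by
  cases h : PySem.List.min? xs (fun x => x) with
  | none =>
    have hxs : xs = [] := (PySem.List.min?_eq_none_iff xs (fun x => x)).mp h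
    subst hxs; cases hb
  | some m =>
    have h1 := PySem.List.min?_isMin h b hb
    have h2 := hall m (PySem.List.min?_mem h)
    simp only [] at h1
    exact congrArg some (le_antisymm h1 h2)
theorem pv_filter_head_find {α : Type} (l : List α) (p : α → Bool) :
    (l.filter p).head? = l.find? p := by
  induction l with
  | nil => rfl
  | cons a t ih => by_cases h : p a <;> simp [h, ih]

-- A's norm_map, evaluated: its items are the normalised pairs in order.
set_option maxRecDepth 200000 in
theorem pvNormMap_items :
    (PySem.Dict.ofList (pvPLOTS.map (fun p => (pvNorm p.2, p.1)))).items
      = pvPLOTS.map (fun p => (pvNorm p.2, p.1)) := by decide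

-- assoc lookup on a literal dict is find?
theorem pvDictGet?_eq_find? (l : List (String × Int)) (q : String) :
    (PySem.Dict.mk l).get? q = (l.find? (fun kv => kv.1 = q)).map (·.2) := by
  induction l with
  | nil => simp [PySem.Dict.get?]
  | cons hd tl ih =>
    rw [show (PySem.Dict.mk (hd :: tl)) = (PySem.Dict.mk ((hd.1, hd.2) :: tl)) by simp,
        PySem.Dict.get?_mk_cons]
    by_cases h : hd.1 = q <;> simp [h, ih]

set_option maxRecDepth 200000 in
set_option maxHeartbeats 2000000 in
theorem resolve_plot_id_py_eq (query : String) :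
    resolve_plot_id_py query = resolve_plot_id_py_alt query := by
  unfold resolve_plot_id_py resolve_plot_id_py_alt
  have hdict : (PySem.Dict.ofList (pvPLOTS.map (fun p => (pvNorm p.2, p.1))))
      = PySem.Dict.mk (pvPLOTS.map (fun p => (pvNorm p.2, p.1))) := by
    apply PySem.Dict.ext; rw [pvNormMap_items]
  rw [hdict]
  generalize pvPLOTS = l
  simp only [pvDictGet?_eq_find?, List.find?_map, List.filter_map, List.map_map]
  have c1 : ((fun kv : String × Int => decide (kv.1 = pvNorm query)) ∘
      fun p : Int × String => (pvNorm p.2, p.1)) =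
      (fun p : Int × String => decide (pvNorm p.2 = pvNorm query)) := by funext p; simp
  have c2 : ((fun kv : String × Int => PySem.Str.startswith kv.1 (pvNorm query)) ∘
      fun p : Int × String => (pvNorm p.2, p.1)) =
      (fun p : Int × String => PySem.Str.startswith (pvNorm p.2) (pvNorm query)) := by funext p; simp
  have c3 : ((fun kv : String × Int => PySem.Str.isIn (pvNorm query) kv.1) ∘
      fun p : Int × String => (pvNorm p.2, p.1)) =
      (fun p : Int × String => PySem.Str.isIn (pvNorm query) (pvNorm p.2)) := by funext p; simp
  have c4 : ((fun x : String × Int => x.2) ∘ fun p : Int × String => (pvNorm p.2, p.1)) =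
      (fun p : Int × String => p.1) := by funext p; simp
  have c5 : ((fun rp : Int × Int => decide (rp.1 < 3)) ∘
      fun p : Int × String => (pvRank (pvNorm query) (pvNorm p.2), p.1)) =
      (fun p : Int × String => decide (pvRank (pvNorm query) (pvNorm p.2) < 3)) := by funext p; simp
  rw [c1, c2, c3, c4, c5]
  generalize pvNorm query = q
  have c6 : ((fun x : Int × Int => x.1) ∘ fun p : Int × String => (pvRank q (pvNorm p.2), p.1)) =
      (fun p : Int × String => pvRank q (pvNorm p.2)) := by funext p; simp
  have c7 : ((fun x : Int × Int => x.2) ∘ fun p : Int × String => (pvRank q (pvNorm p.2), p.1)) =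
      (fun p : Int × String => p.1) := by funext p; simp
  have c8 : ∀ B : Int, ((fun rp : Int × Int => decide (rp.1 = B)) ∘
      fun p : Int × String => (pvRank q (pvNorm p.2), p.1)) =
      (fun p : Int × String => decide (pvRank q (pvNorm p.2) = B)) := by
    intro B; funext p; simp
  rw [c6, c7, c8]
  cases hf : List.find? (fun p : Int × String => decide (pvNorm p.2 = q)) l with
  | some p0 =>
    have hq : pvNorm p0.2 = q := by simpa using List.find?_some hf
    have hmem : p0 ∈ l := List.mem_of_find?_eq_some hf
    have hr0 : pvRank q (pvNorm p0.2) = 0 := (pvRank_eq_zero_iff q _).mpr hq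
    have hfin : p0 ∈ List.filter (fun p : Int × String => decide (pvRank q (pvNorm p.2) < 3)) l :=
      List.mem_filter.mpr ⟨hmem, by simp [hr0]⟩
    have hcin : (pvRank q (pvNorm p0.2), p0.1) ∈
        List.map (fun p : Int × String => (pvRank q (pvNorm p.2), p.1))
          (List.filter (fun p : Int × String => decide (pvRank q (pvNorm p.2) < 3)) l) :=
      List.mem_map_of_mem hfin
    have hmin : (PySem.List.min?
        (List.map (fun p : Int × String => pvRank q (pvNorm p.2))
          (List.filter (fun p : Int × String => decide (pvRank q (pvNorm p.2) < 3)) l))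
        fun v => v) = some 0 := by
      apply pv_min?_eq
      · rw [← hr0]; exact List.mem_map_of_mem hfin
      · intro x hx
        obtain ⟨p, hp, rfl⟩ := List.mem_map.mp hx
        exact pvRank_nonneg q _
    cases hc : List.map (fun p : Int × String => (pvRank q (pvNorm p.2), p.1))
        (List.filter (fun p : Int × String => decide (pvRank q (pvNorm p.2) < 3)) l) with
    | nil => rw [hc] at hcin; cases hcin
    | cons a t =>
      simp only [Option.map_some]
      generalize hbest : (PySem.List.min?
        (List.map (fun p : Int × String => pvRank q (pvNorm p.2))
          (List.filter (fun p : Int × String => decide (pvRank q (pvNorm p.2) < 3)) l))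
        fun v => v).getD 0 = best
      rw [hmin, Option.getD_some] at hbest
      subst hbest
      rw [if_pos (Or.inl rfl)]
      rw [List.filter_filter]
      have hpred : ∀ p ∈ l, (decide (pvRank q (pvNorm p.2) = 0) &&
          decide (pvRank q (pvNorm p.2) < 3)) = decide (pvNorm p.2 = q) := by
        intro p hp
        by_cases h : pvNorm p.2 = q
        · have h0 := (pvRank_eq_zero_iff q (pvNorm p.2)).mpr h
          simp only [h] at h0 ⊢
          simp [h0]
        · have h1 := pvRank_one_le q (pvNorm p.2) h
          simp only [h, decide_false]
          have : ¬ pvRank q (pvNorm p.2) = 0 := by omega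
          simp [this]
      simp only [show (List.filter (fun a : Int × String => decide (pvRank q (pvNorm a.2) = 0) && decide (pvRank q (pvNorm a.2) < 3)) l) = List.filter (fun p : Int × String => decide (pvNorm p.2 = q)) l from List.filter_congr hpred]
      have hgetD : ∀ (xs : List Int) (d : Int), xs.getD 0 d = xs.head?.getD d := by
        intro xs d; cases xs <;> rfl
      rw [hgetD, List.head?_map, pv_filter_head_find, hf]
      rfl
  | none =>
    have hnone : ∀ p ∈ l, ¬ pvNorm p.2 = q := by
      intro p hp
      have := List.find?_eq_none.mp hf p hp
      simpa using this
    simp only [Option.map_none]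
    cases hpl : List.filter (fun p : Int × String => PySem.Str.startswith (pvNorm p.2) q) l with
    | cons a t =>
      have hamem : a ∈ l ∧ PySem.Str.startswith (pvNorm a.2) q = true := by
        have : a ∈ List.filter (fun p : Int × String => PySem.Str.startswith (pvNorm p.2) q) l := by
          rw [hpl]; exact List.mem_cons_self
        simpa using List.mem_filter.mp this
      have hr1 : pvRank q (pvNorm a.2) = 1 :=
        (pvRank_eq_one_iff q _ (hnone a hamem.1)).mpr hamem.2
      have hfin : a ∈ List.filter (fun p : Int × String => decide (pvRank q (pvNorm p.2) < 3)) l :=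
        List.mem_filter.mpr ⟨hamem.1, by simp [hr1]⟩
      have hmin : (PySem.List.min?
          (List.map (fun p : Int × String => pvRank q (pvNorm p.2))
            (List.filter (fun p : Int × String => decide (pvRank q (pvNorm p.2) < 3)) l))
          fun v => v) = some 1 := by
        apply pv_min?_eq
        · rw [← hr1]; exact List.mem_map_of_mem hfin
        · intro x hx
          obtain ⟨p, hp, rfl⟩ := List.mem_map.mp hx
          exact pvRank_one_le q _ (hnone p (List.mem_filter.mp hp).1)
      cases hc : List.map (fun p : Int × String => (pvRank q (pvNorm p.2), p.1))
          (List.filter (fun p : Int × String => decide (pvRank q (pvNorm p.2) < 3)) l) with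
      | nil =>
        have := List.mem_map_of_mem (f := fun p : Int × String => (pvRank q (pvNorm p.2), p.1)) hfin
        rw [hc] at this; cases this
      | cons b t2 =>
        generalize hbest : (PySem.List.min?
          (List.map (fun p : Int × String => pvRank q (pvNorm p.2))
            (List.filter (fun p : Int × String => decide (pvRank q (pvNorm p.2) < 3)) l))
          fun v => v).getD 0 = best
        rw [hmin, Option.getD_some] at hbest
        subst hbest
        rw [List.filter_filter]
        have hpred : ∀ p ∈ l, (decide (pvRank q (pvNorm p.2) = 1) &&
            decide (pvRank q (pvNorm p.2) < 3)) = PySem.Str.startswith (pvNorm p.2) q := by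
          intro p hp
          by_cases h : PySem.Str.startswith (pvNorm p.2) q = true
          · have h1 := (pvRank_eq_one_iff q _ (hnone p hp)).mpr h
            rw [h]; simp [h1]
          · have h2 : ¬ pvRank q (pvNorm p.2) = 1 := fun hcc =>
              h ((pvRank_eq_one_iff q _ (hnone p hp)).mp hcc)
            rw [Bool.not_eq_true] at h
            rw [h]
            simp [h2]
        rw [List.filter_congr hpred, hpl]
        by_cases ht : t = []
        · subst ht; simp
        · have hpos : 0 < t.length := List.length_pos_iff.mpr ht
          rw [if_neg (by simp only [List.length_map, List.length_cons]; omega),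
            if_pos (by simp only [List.length_map, List.length_cons]; omega),
            if_neg (by simp only [List.length_map, List.length_cons]
                       rintro (h | h) <;> omega)]
    | nil =>
      have hnopfx : ∀ p ∈ l, ¬ PySem.Str.startswith (pvNorm p.2) q = true :=
        List.filter_eq_nil_iff.mp hpl
      have hcongr : List.filter (fun p : Int × String => decide (pvRank q (pvNorm p.2) < 3)) l
          = List.filter (fun p : Int × String => PySem.Str.isIn q (pvNorm p.2)) l := by
        apply List.filter_congr
        intro p hp
        rcases pvRank_lt3_iff_isIn q (pvNorm p.2) (hnone p hp) (hnopfx p hp) with ⟨h1, _⟩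
        by_cases h : PySem.Str.isIn q (pvNorm p.2) = true
        · rw [h]; simp [h1.mpr h]
        · have : ¬ pvRank q (pvNorm p.2) < 3 := fun hcc => h (h1.mp hcc)
          rw [Bool.not_eq_true] at h
          rw [h]
          simp [this]
      rw [hcongr]
      cases hs : List.filter (fun p : Int × String => PySem.Str.isIn q (pvNorm p.2)) l with
      | nil => simp
      | cons b t =>
        have hbmem : b ∈ l ∧ PySem.Str.isIn q (pvNorm b.2) = true := by
          have : b ∈ List.filter (fun p : Int × String => PySem.Str.isIn q (pvNorm p.2)) l := by
            rw [hs]; exact List.mem_cons_self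
          simpa using List.mem_filter.mp this
        have hall2 : ∀ p ∈ (b :: t), pvRank q (pvNorm p.2) = 2 := by
          intro p hp
          have hpf : p ∈ List.filter (fun p : Int × String => PySem.Str.isIn q (pvNorm p.2)) l := by
            rw [hs]; exact hp
          have hpl2 := List.mem_filter.mp hpf
          exact ((pvRank_lt3_iff_isIn q _ (hnone p hpl2.1) (hnopfx p hpl2.1)).2).mpr (by simpa using hpl2.2)
        have hmin : (PySem.List.min?
            (List.map (fun p : Int × String => pvRank q (pvNorm p.2)) (b :: t))
            fun v => v) = some 2 := by
          apply pv_min?_eq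
          · rw [← hall2 b List.mem_cons_self]; exact List.mem_map_of_mem List.mem_cons_self
          · intro x hx
            obtain ⟨p, hp, rfl⟩ := List.mem_map.mp hx
            rw [hall2 p hp]
        generalize hbest : (PySem.List.min?
          (List.map (fun p : Int × String => pvRank q (pvNorm p.2)) (b :: t))
          fun v => v).getD 0 = best
        rw [hmin, Option.getD_some] at hbest
        subst hbest
        simp only [List.map_cons]
        have hfeq : List.filter (fun p : Int × String => decide (pvRank q (pvNorm p.2) = 2)) (b :: t)
            = b :: t := by
          apply List.filter_eq_self.mpr
          intro p hp
          simp [hall2 p hp]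
        rw [hfeq]
        by_cases ht : t = []
        · subst ht; simp
        · have hpos : 0 < t.length := List.length_pos_iff.mpr ht
          rw [if_neg (by simp), if_neg (by simp),
            if_neg (by simp only [List.length_cons, List.length_map]; omega),
            if_neg (by simp only [List.length_cons, List.length_map]
                       rintro (h | h) <;> omega)]

-- ===== VERDICT (by name: the statement is the Claim_ definition above) =====
theorem resolve_plot_id_py_spec : Claim_equal_resolve_plot_id_py := by
  intro query _ _
  unfold Spec_resolve_plot_id_py
  exact resolve_plot_id_py_eq query
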